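-- pv_equiv track=rewrite | github.com/MariaTerzieva/bg-automatic-punctuation | solution/modules/data_prep.py | between_two_verbs
-- ===== SOURCE A (Python) =====
-- def between_two_verbs(sentence, i):
--     verb_before = False
--     verb_after = False
--
--     for word_i in reversed(range(len(sentence[:(i+1)]))):
--         if sentence[word_i]['upos'] == 'VERB':
--             verb_before = True
--
--     for word in sentence[(i+1):]:
--         if word['upos'] == 'VERB':
--             verb_after = True
--
--     return verb_before and verb_after
-- ===== SOURCE B (Python) =====
-- def between_two_verbs(sentence, i):
--     verbs = [j for j, word in enumerate(sentence) if word['upos'] == 'VERB']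
--     return bool(verbs) and verbs[0] <= i < verbs[-1]
-- ===== Notes on version B (the rewrite author's own statement) =====
-- stated objective: alternative
-- what changed: Replaced A's two independent flag-scans over the slices sentence[:i+1] and sentence[i+1:] by one comprehension collecting the verb indices followed by a closed-form endpoint test verbs[0] <= i < verbs[-1].
-- intended difference: For i <= -2 with a verb strictly before the wrapped slice split i+1+len(sentence) and a verb at-or-after it, A returns True because Python's negative slice bound wraps around, while B returns False; B's value is intended since no word position can be at-or-before a negative position i. — e.g. on between_two_verbs([[("upos", "VERB")], [("upos", "VERB")]], -2): A returns true, B returns false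
import Mathlib
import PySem

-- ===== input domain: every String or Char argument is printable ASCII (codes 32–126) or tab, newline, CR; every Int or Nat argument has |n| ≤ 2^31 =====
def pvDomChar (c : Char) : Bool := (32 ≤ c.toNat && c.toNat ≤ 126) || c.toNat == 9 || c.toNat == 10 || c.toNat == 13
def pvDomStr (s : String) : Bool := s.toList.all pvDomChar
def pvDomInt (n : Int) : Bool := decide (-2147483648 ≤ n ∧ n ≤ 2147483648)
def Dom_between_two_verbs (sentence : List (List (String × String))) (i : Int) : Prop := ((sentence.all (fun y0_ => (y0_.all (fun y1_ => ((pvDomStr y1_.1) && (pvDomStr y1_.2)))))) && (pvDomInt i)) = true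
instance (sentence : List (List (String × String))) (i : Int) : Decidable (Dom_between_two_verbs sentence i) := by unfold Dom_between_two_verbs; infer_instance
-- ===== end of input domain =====

-- B replaces A's two flag-scans over slices by one comprehension collecting verb indices plus an
-- endpoint comparison (alternative decomposition); for i ≤ -2 A's slice wraps around while B
-- reads i as a plain word position, stated below as the intended difference D_.


-- ===== PORT A =====
-- word['upos'] as a total lookup: `none` exactly where Python raises KeyError (excluded by Pre_).
def wordUpos (w : List (String × String)) : Option String := (PySem.Dict.mk w).get? "upos"

def between_two_verbs (sentence : List (List (String × String))) (i : Int) : Bool :=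
  -- for word_i in reversed(range(len(sentence[:(i+1)]))): if sentence[word_i]['upos'] == 'VERB': verb_before = True
  let verb_before :=
    ((PySem.List.pyRange 0 (PySem.List.len (PySem.List.slice sentence none (some (i+1)))) 1).reverse).foldl
      (fun acc word_i =>
        if wordUpos (PySem.List.pyGetD sentence word_i []) == some "VERB" then true else acc) false
  -- for word in sentence[(i+1):]: if word['upos'] == 'VERB': verb_after = True
  let verb_after :=
    (PySem.List.slice sentence (some (i+1)) none).foldl
      (fun acc word => if wordUpos word == some "VERB" then true else acc) false
  verb_before && verb_after

-- ===== PORT B =====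
-- verbs = [j for j, word in enumerate(sentence) if word['upos'] == 'VERB']
-- return bool(verbs) and verbs[0] <= i < verbs[-1]
def between_two_verbs_alt (sentence : List (List (String × String))) (i : Int) : Bool :=
  let verbs := (sentence.zipIdx).filterMap
    (fun p => if wordUpos p.1 == some "VERB" then some ((p.2 : Int)) else none)
  match verbs.head?, verbs.getLast? with
  | some f, some l => decide (f ≤ i) && decide (i < l)
  | _, _ => false

-- ===== PRECONDITION & SPEC =====
-- abbreviation used by D_ and the proofs
def isVerb (w : List (String × String)) : Bool := wordUpos w == some "VERB"

-- Pre_ excludes exactly the inputs where Python A raises KeyError: a word without an 'upos' key.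
def Pre_between_two_verbs (sentence : List (List (String × String))) (i : Int) : Prop :=
  ∀ w ∈ sentence, (wordUpos w).isSome
instance (sentence : List (List (String × String))) (i : Int) : Decidable (Pre_between_two_verbs sentence i) := by unfold Pre_between_two_verbs; infer_instance

def pvWitness_between_two_verbs : (List (List (String × String))) × Int :=
  ([[("upos", "VERB")], [("upos", "NOUN")], [("upos", "VERB")]], 0)

-- D_ holds exactly for i ≤ -2 with a verb strictly before the wrapped slice split i+1+len(sentence)
-- and a verb at-or-after it (for i ≥ -1 the suffix part is empty, so D_ is false): there A returns
-- True (Python's negative slice bound wraps around), while B returns False; B's value is intended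
-- because no word position can be at-or-before a negative position i.
def D_between_two_verbs (sentence : List (List (String × String))) (i : Int) : Prop :=
  (sentence.take (i + 1 + sentence.length).toNat).any isVerb ∧
  (sentence.drop (i + 1 + sentence.length).toNat).any isVerb
instance (sentence : List (List (String × String))) (i : Int) : Decidable (D_between_two_verbs sentence i) := by unfold D_between_two_verbs; infer_instance

def Spec_between_two_verbs (sentence : List (List (String × String))) (i : Int) (out : Bool) : Prop := ¬ D_between_two_verbs sentence i → out = between_two_verbs_alt sentence i
instance (sentence : List (List (String × String))) (i : Int) (out : Bool) : Decidable (Spec_between_two_verbs sentence i out) := by unfold Spec_between_two_verbs; infer_instance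

def pvDiffWitness_between_two_verbs : (List (List (String × String))) × Int :=
  ([[("upos", "VERB")], [("upos", "VERB")]], -2)
def pvDiffWitnessOut_between_two_verbs : Bool × Bool := (true, false)

-- ===== CLAIM (what is proved, stated in full; the proofs are below) =====
def Claim_unchanged_between_two_verbs : Prop := ∀ (sentence : List (List (String × String))) (i : Int), Dom_between_two_verbs sentence i → Pre_between_two_verbs sentence i → Spec_between_two_verbs sentence i (between_two_verbs sentence i)
def Claim_changed_between_two_verbs : Prop := Dom_between_two_verbs (pvDiffWitness_between_two_verbs.1) (pvDiffWitness_between_two_verbs.2) ∧ Pre_between_two_verbs (pvDiffWitness_between_two_verbs.1) (pvDiffWitness_between_two_verbs.2) ∧ D_between_two_verbs (pvDiffWitness_between_two_verbs.1) (pvDiffWitness_between_two_verbs.2) ∧ between_two_verbs (pvDiffWitness_between_two_verbs.1) (pvDiffWitness_between_two_verbs.2) = pvDiffWitnessOut_between_two_verbs.1 ∧ between_two_verbs_alt (pvDiffWitness_between_two_verbs.1) (pvDiffWitness_between_two_verbs.2) = pvDiffWitnessOut_between_two_verbs.2 ∧ pvDiffWitnessOut_between_two_verbs.1 ≠ pv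DiffWitnessOut_between_two_verbs.2
def Claim_exact_between_two_verbs : Prop := ∀ (sentence : List (List (String × String))) (i : Int), Dom_between_two_verbs sentence i → Pre_between_two_verbs sentence i → D_between_two_verbs sentence i → between_two_verbs sentence i ≠ between_two_verbs_alt sentence i

-- ===== LEMMAS AND PROOFS =====

-- Python's flag loop is `any`
theorem foldl_if_true {α : Type} (q : α → Bool) (l : List α) (b : Bool) :
    l.foldl (fun acc x => if q x then true else acc) b = (b || l.any q) := by
  induction l generalizing b with
  | nil => simp
  | cons x xs ih =>
    by_cases h : q x = true
    · simp only [List.foldl_cons, if_pos h, ih, List.any_cons]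
      cases b <;> simp [h]
    · simp only [List.foldl_cons, if_neg h, ih, List.any_cons]
      cases b <;> simp [h]

theorem clampIdx_le (n : Nat) (j : Int) : PySem.List.clampIdx n j ≤ n := by
  unfold PySem.List.clampIdx; split_ifs <;> omega

theorem range_any_getD {α : Type} (q : α → Bool) (d : α) (xs : List α) (c : Nat)
    (hc : c ≤ xs.length) :
    (List.range c).any (fun j => q (xs.getD j d)) = (xs.take c).any q := by
  induction c with
  | zero => simp
  | succ c ih =>
    have hlt : c < xs.length := by omega
    rw [List.range_succ, List.take_add_one, List.any_append, List.any_append,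
      ih (by omega)]
    simp [List.getElem?_eq_getElem hlt]

-- A's value in take/drop form at the clamped split point
theorem A_eq (sentence : List (List (String × String))) (i : Int) :
    between_two_verbs sentence i =
      ((sentence.take (PySem.List.clampIdx sentence.length (i+1))).any isVerb &&
       (sentence.drop (PySem.List.clampIdx sentence.length (i+1))).any isVerb) := by
  unfold between_two_verbs
  have hslice_to : PySem.List.slice sentence none (some (i+1))
      = sentence.take (PySem.List.clampIdx sentence.length (i+1)) := by
    simp [PySem.List.slice]
  have hslice_from : PySem.List.slice sentence (some (i+1)) none
      = sentence.drop (PySem.List.clampIdx sentence.length (i+1)) := by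
    simp only [PySem.List.slice]
    exact List.take_of_length_le (by simpa using clampIdx_le sentence.length (i+1))
  rw [hslice_to, hslice_from, foldl_if_true, foldl_if_true, PySem.List.len_eq]
  have hlen : (sentence.take (PySem.List.clampIdx sentence.length (i+1))).length
      = PySem.List.clampIdx sentence.length (i+1) :=
    List.length_take_of_le (clampIdx_le _ _)
  rw [hlen, List.any_reverse, PySem.List.pyRange_zero_nat, List.any_map]
  simp only [Bool.false_or, Function.comp_def, PySem.List.pyGetD_natCast]
  rw [← range_any_getD isVerb [] sentence _ (clampIdx_le _ _)]
  rfl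

-- last index satisfying q
def lastIdx? {α : Type} (q : α → Bool) : List α → Option Nat
  | [] => none
  | x :: xs =>
    match lastIdx? q xs with
    | some j => some (j + 1)
    | none => if q x then some 0 else none

theorem lastIdx?_eq_none_iff {α : Type} (q : α → Bool) (xs : List α) :
    lastIdx? q xs = none ↔ ∀ x ∈ xs, ¬ q x := by
  induction xs with
  | nil => simp [lastIdx?]
  | cons x xs ih =>
    simp only [lastIdx?]
    cases h : lastIdx? q xs with
    | some j =>
      have : ¬ ∀ x ∈ xs, ¬ q x := by rw [← ih, h]; simp
      simp only [List.mem_cons]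
      constructor
      · intro hn; cases hn
      · intro hall; exact absurd (fun y hy => hall y (Or.inr hy)) this
    | none =>
      rw [ih] at h
      by_cases hq : q x = true
      · simp [hq]
      · simp only [if_neg hq, List.mem_cons]
        constructor
        · rintro - y (rfl | hy)
          · exact hq
          · exact h y hy
        · intro _; trivial

-- prefix test: if f is the first q-index, (take c).any q = (f < c)
theorem take_any_eq_findIdx {α : Type} (q : α → Bool) (xs : List α) (c f : Nat)
    (h : xs.findIdx? q = some f) : (xs.take c).any q = decide (f < c) := by
  induction xs generalizing c f with
  | nil => simp at h
  | cons x xs ih =>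
    rw [List.findIdx?_cons] at h
    by_cases hq : q x = true
    · rw [if_pos hq] at h
      injection h with h; subst h
      cases c with
      | zero => simp
      | succ c => simp [hq]
    · rw [if_neg hq] at h
      obtain ⟨f', hf', rfl⟩ := Option.map_eq_some_iff.mp h
      cases c with
      | zero => simp
      | succ c =>
        simp only [List.take_succ_cons, List.any_cons, hq, Bool.false_or,
          ih c f' hf']
        simp only [decide_eq_decide]
        omega

-- suffix test: if l is the last q-index, (drop c).any q = (c ≤ l)
theorem drop_any_eq_lastIdx {α : Type} (q : α → Bool) (xs : List α) (c l : Nat)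
    (h : lastIdx? q xs = some l) : (xs.drop c).any q = decide (c ≤ l) := by
  induction xs generalizing c l with
  | nil => simp [lastIdx?] at h
  | cons x xs ih =>
    simp only [lastIdx?] at h
    cases hx : lastIdx? q xs with
    | some j =>
      rw [hx] at h
      injection h with h; subst h
      cases c with
      | zero =>
        have := ih 0 j hx
        simp only [List.drop_zero, List.any_cons] at this ⊢
        simp [this]
      | succ c =>
        rw [List.drop_succ_cons, ih c j hx]
        simp only [decide_eq_decide]
        omega
    | none =>
      rw [hx] at h
      have hall : ∀ y ∈ xs, ¬ q y := (lastIdx?_eq_none_iff q xs).mp hx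
      by_cases hq : q x = true
      · rw [if_pos hq] at h
        injection h with h; subst h
        cases c with
        | zero => simp [hq]
        | succ c =>
          rw [List.drop_succ_cons]
          have hz : (xs.drop c).any q = false := by
            rw [List.any_eq_false]
            exact fun y hy => by simp [hall y (List.mem_of_mem_drop hy)]
          rw [hz]
          simp
      · rw [if_neg hq] at h; cases h

-- specifications of findIdx? / lastIdx? through getD
theorem findIdx?_spec {α : Type} (q : α → Bool) (d : α) (xs : List α) (f : Nat)
    (h : xs.findIdx? q = some f) :
    f < xs.length ∧ q (xs.getD f d) = true ∧ ∀ j < f, q (xs.getD j d) = false := by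
  induction xs generalizing f with
  | nil => simp at h
  | cons x xs ih =>
    rw [List.findIdx?_cons] at h
    by_cases hq : q x = true
    · rw [if_pos hq] at h
      injection h with h; subst h
      exact ⟨by simp, by simpa using hq, fun j hj => by omega⟩
    · rw [if_neg hq] at h
      obtain ⟨f', hf', rfl⟩ := Option.map_eq_some_iff.mp h
      obtain ⟨h1, h2, h3⟩ := ih f' hf'
      refine ⟨by simpa using h1, by simpa using h2, ?_⟩
      intro j hj
      cases j with
      | zero => simpa using hq
      | succ j => simpa using h3 j (by omega)

theorem lastIdx?_spec {α : Type} (q : α → Bool) (d : α) (xs : List α) (l : Nat)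
    (h : lastIdx? q xs = some l) :
    l < xs.length ∧ q (xs.getD l d) = true ∧
      ∀ j, l < j → j < xs.length → q (xs.getD j d) = false := by
  induction xs generalizing l with
  | nil => simp [lastIdx?] at h
  | cons x xs ih =>
    simp only [lastIdx?] at h
    cases hx : lastIdx? q xs with
    | some j =>
      rw [hx] at h
      injection h with h; subst h
      obtain ⟨h1, h2, h3⟩ := ih j hx
      refine ⟨by simpa using h1, by simpa using h2, ?_⟩
      intro k hk hk2
      cases k with
      | zero => omega
      | succ k => simpa using h3 k (by omega) (by simpa using hk2)
    | none =>
      rw [hx] at h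
      have hall : ∀ y ∈ xs, ¬ q y = true := (lastIdx?_eq_none_iff q xs).mp hx
      by_cases hq : q x = true
      · rw [if_pos hq] at h
        injection h with h; subst h
        refine ⟨by simp, by simpa using hq, ?_⟩
        intro k hk hk2
        cases k with
        | zero => omega
        | succ k =>
          have hklen : k < xs.length := by simpa using hk2
          simp only [List.getD_cons_succ]
          have hmem : xs.getD k d ∈ xs := by
            rw [List.getD_eq_getElem?_getD, List.getElem?_eq_getElem hklen]
            exact List.getElem_mem hklen
          simpa using hall _ hmem
      · rw [if_neg hq] at h; cases h

-- B's verbs list: head / last through findIdx? / lastIdx?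
theorem verbs_head? (xs : List (List (String × String))) (k : Nat) :
    ((xs.zipIdx k).filterMap
      (fun p => if wordUpos p.1 == some "VERB" then some ((p.2 : Int)) else none)).head?
    = (xs.findIdx? isVerb).map (fun j => ((k + j : Nat) : Int)) := by
  induction xs generalizing k with
  | nil => simp
  | cons x xs ih =>
    rw [List.zipIdx_cons, List.filterMap_cons, List.findIdx?_cons]
    by_cases hx : isVerb x = true
    · have hx' : (wordUpos x == some "VERB") = true := hx
      simp [hx', hx]
    · have hx' : ¬ (wordUpos x == some "VERB") = true := hx
      rw [if_neg hx', if_neg hx, ih]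
      cases xs.findIdx? isVerb with
      | none => simp
      | some j => simp; omega

theorem verbs_nil_of_no_verb (xs : List (List (String × String))) (k : Nat)
    (hall : ∀ y ∈ xs, ¬ isVerb y) :
    ((xs.zipIdx k).filterMap
      (fun p => if wordUpos p.1 == some "VERB" then some ((p.2 : Int)) else none)) = [] := by
  induction xs generalizing k with
  | nil => simp
  | cons x xs ih =>
    rw [List.zipIdx_cons, List.filterMap_cons]
    have hx : ¬ (wordUpos x == some "VERB") = true := hall x (by simp)
    rw [if_neg hx]
    exact ih (k+1) (fun y hy => hall y (by simp [hy]))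

theorem verbs_getLast? (xs : List (List (String × String))) (k : Nat) :
    ((xs.zipIdx k).filterMap
      (fun p => if wordUpos p.1 == some "VERB" then some ((p.2 : Int)) else none)).getLast?
    = (lastIdx? isVerb xs).map (fun j => ((k + j : Nat) : Int)) := by
  induction xs generalizing k with
  | nil => simp [lastIdx?]
  | cons x xs ih =>
    rw [List.zipIdx_cons, List.filterMap_cons]
    simp only [lastIdx?]
    cases hx : lastIdx? isVerb xs with
    | some j =>
      by_cases hv : isVerb x = true
      · have hv' : (wordUpos x == some "VERB") = true := hv
        rw [if_pos hv']
        rw [List.getLast?_cons, ih, hx]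
        simp; omega
      · have hv' : ¬ (wordUpos x == some "VERB") = true := hv
        rw [if_neg hv', ih, hx]
        simp; omega
    | none =>
      have hall : ∀ y ∈ xs, ¬ isVerb y := (lastIdx?_eq_none_iff isVerb xs).mp hx
      have hnil := verbs_nil_of_no_verb xs (k+1) hall
      by_cases hv : isVerb x = true
      · have hv' : (wordUpos x == some "VERB") = true := hv
        rw [if_pos hv', hnil, if_pos hv]
        simp
      · have hv' : ¬ (wordUpos x == some "VERB") = true := hv
        rw [if_neg hv', hnil, if_neg hv]
        simp

-- B's value through findIdx? / lastIdx?
theorem B_eq (sentence : List (List (String × String))) (i : Int) :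
    between_two_verbs_alt sentence i =
      (match sentence.findIdx? isVerb, lastIdx? isVerb sentence with
       | some f, some l => decide ((f : Int) ≤ i) && decide (i < (l : Int))
       | _, _ => false) := by
  unfold between_two_verbs_alt
  have h1 := verbs_head? sentence 0
  have h2 := verbs_getLast? sentence 0
  simp only [List.zipIdx] at h1 h2 ⊢
  rw [h1, h2]
  cases sentence.findIdx? isVerb with
  | none => cases lastIdx? isVerb sentence <;> simp
  | some f => cases lastIdx? isVerb sentence <;> simp

theorem clampIdx_as_int (n : Nat) (j : Int) :
    (PySem.List.clampIdx n j : Int) = min (max (if j < 0 then j + n else j) 0) n := by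
  unfold PySem.List.clampIdx
  split_ifs <;> omega

-- D_ through the first / last verb index
theorem D_iff (sentence : List (List (String × String))) (i : Int) (f l : Nat)
    (hf : sentence.findIdx? isVerb = some f) (hl : lastIdx? isVerb sentence = some l) :
    D_between_two_verbs sentence i ↔
      (f < (i + 1 + (sentence.length : Int)).toNat ∧ (i + 1 + (sentence.length : Int)).toNat ≤ l) := by
  unfold D_between_two_verbs
  rw [take_any_eq_findIdx isVerb sentence _ f hf, drop_any_eq_lastIdx isVerb sentence _ l hl]
  simp only [decide_eq_true_eq]

-- ===== VERDICT (by name: the statements are the Claim_ definitions above) =====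
theorem between_two_verbs_spec : Claim_unchanged_between_two_verbs := by
  intro sentence i _ _ hD
  rw [A_eq, B_eq]
  cases hf : sentence.findIdx? isVerb with
  | none =>
    have hall := List.findIdx?_eq_none_iff.mp hf
    have hl : lastIdx? isVerb sentence = none :=
      (lastIdx?_eq_none_iff isVerb sentence).mpr (fun y hy => by simp [hall y hy])
    have htake : (sentence.take (PySem.List.clampIdx sentence.length (i+1))).any isVerb = false := by
      rw [List.any_eq_false]
      exact fun y hy => by simp [hall y (List.mem_of_mem_take hy)]
    simp [hl, htake]
  | some f =>
    cases hl : lastIdx? isVerb sentence with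
    | none =>
      exfalso
      have hall := (lastIdx?_eq_none_iff isVerb sentence).mp hl
      rw [List.findIdx?_eq_none_iff.mpr (fun y hy => by simp [hall y hy])] at hf
      cases hf
    | some l =>
      obtain ⟨hf1, _, _⟩ := findIdx?_spec isVerb [] sentence f hf
      obtain ⟨hl1, _, _⟩ := lastIdx?_spec isVerb [] sentence l hl
      rw [take_any_eq_findIdx isVerb sentence _ f hf,
        drop_any_eq_lastIdx isVerb sentence _ l hl]
      rw [D_iff sentence i f l hf hl] at hD
      have hk := clampIdx_as_int sentence.length (i+1)
      rw [show (match (some f : Option Nat), (some l : Option Nat) with | some f, some l => decide ((f:Int) ≤ i) && decide (i < (l:Int)) | _, _ => false) = (decide ((f:Int) ≤ i) && decide (i < (l:Int))) from rfl]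
      rw [← Bool.decide_and, ← Bool.decide_and, decide_eq_decide]
      split_ifs at hk <;> omega

theorem between_two_verbs_changed : Claim_changed_between_two_verbs := by
  unfold Claim_changed_between_two_verbs; decide

theorem between_two_verbs_tight : Claim_exact_between_two_verbs := by
  intro sentence i _ _ hD
  cases hf : sentence.findIdx? isVerb with
  | none =>
    exfalso
    have hall := List.findIdx?_eq_none_iff.mp hf
    obtain ⟨h1, -⟩ := hD
    obtain ⟨y, hy, hyv⟩ := List.any_eq_true.mp h1
    rw [hall y (List.mem_of_mem_take hy)] at hyv
    cases hyv
  | some f =>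
    cases hl : lastIdx? isVerb sentence with
    | none =>
      exfalso
      have hall := (lastIdx?_eq_none_iff isVerb sentence).mp hl
      rw [List.findIdx?_eq_none_iff.mpr (fun y hy => by simp [hall y hy])] at hf
      cases hf
    | some l =>
      obtain ⟨hf1, _, _⟩ := findIdx?_spec isVerb [] sentence f hf
      obtain ⟨hl1, _, _⟩ := lastIdx?_spec isVerb [] sentence l hl
      rw [D_iff sentence i f l hf hl] at hD
      rw [A_eq, B_eq, take_any_eq_findIdx isVerb sentence _ f hf,
        drop_any_eq_lastIdx isVerb sentence _ l hl]
      have hk := clampIdx_as_int sentence.length (i+1)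
      rw [hf, hl]
      rw [show (match (some f : Option Nat), (some l : Option Nat) with | some f, some l => decide ((f:Int) ≤ i) && decide (i < (l:Int)) | _, _ => false) = (decide ((f:Int) ≤ i) && decide (i < (l:Int))) from rfl]
      rw [← Bool.decide_and, ← Bool.decide_and]
      intro hc
      rw [decide_eq_decide] at hc
      split_ifs at hk <;> omega
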